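-- pv_equiv track=rewrite | github.com/me-harshil/Hacker-Rank-30-day | 1111.py | solve
-- ===== SOURCE A (Python) =====
-- def solve(n,nums):
--    ans = 0
--    nums.sort()
--    a = 0
--    for i in range(n - 1, -1, -1):
--       cand = nums[i] + n - i
--       if cand > a:
--          a = cand
--    for x in nums:
--       if x + n >= a:
--          ans += 1
--    return ans
-- ===== SOURCE B (Python) =====
-- def solve(n, nums):
--     # Single backward pass: count each element against the running suffix
--     # maximum r = max(-n, max(nums[j]-j for j in range(i+1, n))).  On the
--     # sorted list, terms nums[j]-j with j <= i can never exceed nums[i],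
--     # so comparing against the suffix maximum alone is already the full test.
--     nums.sort()
--     ans = 0
--     r = -n
--     for i in range(len(nums) - 1, -1, -1):
--         if nums[i] >= r:
--             ans += 1
--         if i < n:
--             r = max(r, nums[i] - i)
--     return ans
-- ===== Notes on version B (the rewrite author's own statement) =====
-- stated objective: alternative
-- what changed: A's two staged passes (compute the full threshold maximum, then a second scan counting elements against it) are fused into one backward pass that counts each element against only the running suffix maximum, which is sufficient because on the sorted list the terms nums[j]-j with j <= i can never exceed nums[i].
import Mathlib
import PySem

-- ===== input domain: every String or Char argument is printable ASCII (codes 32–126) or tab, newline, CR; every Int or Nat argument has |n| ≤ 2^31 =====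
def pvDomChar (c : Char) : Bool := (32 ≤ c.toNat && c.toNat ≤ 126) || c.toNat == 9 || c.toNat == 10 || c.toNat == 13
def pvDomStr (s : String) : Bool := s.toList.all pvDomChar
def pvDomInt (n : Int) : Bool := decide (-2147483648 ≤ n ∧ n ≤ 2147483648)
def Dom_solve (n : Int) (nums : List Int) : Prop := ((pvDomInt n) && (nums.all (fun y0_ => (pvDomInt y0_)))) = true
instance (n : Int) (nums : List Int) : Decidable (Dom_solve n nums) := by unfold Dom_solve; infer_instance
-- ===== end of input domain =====

-- B fuses A's two staged passes (full threshold max, then a counting scan) into ONE backward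
-- pass that counts each element against the running SUFFIX maximum only, correct because on the
-- sorted list terms nums[j]-j with j ≤ i can never exceed nums[i] (objective: alternative).
-- Both A and B sort `nums` in place; the equivalence proved here is about the RETURN value
-- (the in-place sort side effect is identical in A and B).

-- ===== PORT A =====
-- nums[i] is ported as pyGetD with default 0: Pre_solve guarantees 0 ≤ i < len(nums) for every
-- index A reads, so the default is never used on admitted inputs (Python raises IndexError outside).
def solve (n : Int) (nums : List Int) : Int :=
  let ans : Int := 0
  let s := PySem.List.sorted nums (fun x => x) false
  let a := (PySem.List.pyRange (n - 1) (-1) (-1)).foldl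
    (fun a i =>
      let cand := PySem.List.pyGetD s i 0 + n - i
      if cand > a then cand else a) 0
  s.foldl (fun ans x => if x + n ≥ a then ans + 1 else ans) ans

-- ===== PORT B =====
def solve_alt (n : Int) (nums : List Int) : Int :=
  let s := PySem.List.sorted nums (fun x => x) false
  let res := (PySem.List.pyRange ((s.length : Int) - 1) (-1) (-1)).foldl
    (fun (st : Int × Int) i =>
      let ans := if PySem.List.pyGetD s i 0 ≥ st.2 then st.1 + 1 else st.1
      let r := if i < n then max st.2 (PySem.List.pyGetD s i 0 - i) else st.2
      (ans, r)) (0, -n)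
  res.1

-- ===== PRECONDITION & SPEC =====
-- Pre_solve excludes exactly the inputs where Python A raises IndexError: A reads nums[i] for
-- every i in range(n-1, -1, -1), so it returns normally iff n ≤ len(nums).
def Pre_solve (n : Int) (nums : List Int) : Prop := n ≤ (nums.length : Int)
instance (n : Int) (nums : List Int) : Decidable (Pre_solve n nums) := by unfold Pre_solve; infer_instance
def pvWitness_solve : Int × List Int := (3, [2, -1, 2])

def Spec_solve (n : Int) (nums : List Int) (out : Int) : Prop := out = solve_alt n nums
instance (n : Int) (nums : List Int) (out : Int) : Decidable (Spec_solve n nums out) := by unfold Spec_solve; infer_instance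

-- ===== CLAIM (what is proved, stated in full; the proofs are below) =====
def Claim_equal_solve : Prop := ∀ (n : Int) (nums : List Int), Dom_solve n nums → Pre_solve n nums → Spec_solve n nums (solve n nums)

-- ===== LEMMAS AND PROOFS =====

-- The running suffix maximum B maintains: r after the loop has processed indices k, k+1, …
-- (i.e. before index k-1) equals max(-n, max_{k ≤ j < n} (s[j] - j)).
def suffMax (s : List Int) (n : Int) (k : Nat) : Int :=
  (List.range' k (n.toNat - k)).foldl (fun t j => max t (s.getD j 0 - (j : Int))) (-n)

-- Shifting a running max by a constant: A's max of nums[i] + n - i (init 0) is n plus the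
-- max of nums[i] - i (init -n).
theorem foldl_max_shift (n : Int) (g : Int → Int) (l : List Int) (c : Int) :
    l.foldl (fun a i => max a (n + g i)) (n + c) = n + l.foldl (fun t i => max t (g i)) c := by
  induction l generalizing c with
  | nil => rfl
  | cons x xs ih => simpa [max_add_add_left, add_comm] using ih (max c (g x))

-- Pulling one maxed-in value out of the initial accumulator of a max-fold.
theorem foldl_max_out {α : Type} (g : α → Int) (l : List α) (c v : Int) :
    l.foldl (fun a i => max a (g i)) (max c v) = max (l.foldl (fun a i => max a (g i)) c) v := by
  induction l generalizing c with
  | nil => rfl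
  | cons x xs ih =>
    simp only [List.foldl_cons]
    rw [max_right_comm, ih]

-- A max-fold is insensitive to reversal of the index list.
theorem foldl_max_reverse (g : Int → Int) (l : List Int) (c : Int) :
    l.reverse.foldl (fun a i => max a (g i)) c = l.foldl (fun a i => max a (g i)) c := by
  induction l generalizing c with
  | nil => rfl
  | cons x xs ih =>
    rw [List.reverse_cons, List.foldl_append, ih]
    simp only [List.foldl_cons, List.foldl_nil]
    rw [← foldl_max_out]

-- x dominates a max-fold iff it dominates the seed and every folded-in term.
theorem foldl_max_le_iff {α : Type} (g : α → Int) (l : List α) (c x : Int) :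
    l.foldl (fun t j => max t (g j)) c ≤ x ↔ c ≤ x ∧ ∀ j ∈ l, g j ≤ x := by
  induction l generalizing c with
  | nil => simp
  | cons y ys ih =>
    simp only [List.foldl_cons, ih, max_le_iff, List.mem_cons]
    constructor
    · rintro ⟨⟨h1, h2⟩, h3⟩
      exact ⟨h1, fun j hj => hj.elim (fun e => e ▸ h2) (h3 j)⟩
    · rintro ⟨h1, h2⟩
      exact ⟨⟨h1, h2 y (Or.inl rfl)⟩, fun j hj => h2 j (Or.inr hj)⟩

-- One backward step of the suffix maximum.
theorem suffMax_succ (s : List Int) (n : Int) (k : Nat) (hk : (k : Int) < n) :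
    suffMax s n k = max (suffMax s n (k + 1)) (s.getD k 0 - (k : Int)) := by
  have hkN : k < n.toNat := by omega
  have : List.range' k (n.toNat - k) = k :: List.range' (k + 1) (n.toNat - (k + 1)) := by
    have h1 : n.toNat - k = (n.toNat - (k + 1)) + 1 := by omega
    rw [h1, List.range'_succ]
  unfold suffMax
  rw [this]
  simp only [List.foldl_cons]
  exact foldl_max_out (fun j => s.getD j 0 - (j : Int)) _ (-n) (s.getD k 0 - (k : Int))

theorem suffMax_stable (s : List Int) (n : Int) (k : Nat) (hk : ¬ (k : Int) < n) :
    suffMax s n k = suffMax s n (k + 1) := by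
  have h1 : n.toNat - k = 0 := by omega
  have h2 : n.toNat - (k + 1) = 0 := by omega
  unfold suffMax
  rw [h1, h2]
  rfl

-- On a monotone list, comparing s[k] against the suffix maximum beyond k is the same as
-- comparing it against the full threshold suffMax 0: terms s[j]-j with j ≤ k cannot exceed s[k].
theorem ge_suffMax_iff (s : List Int) (n : Int) (k : Nat)
    (hmono : ∀ p q : Nat, p ≤ q → q < s.length → s.getD p 0 ≤ s.getD q 0)
    (hk : k < s.length) :
    (suffMax s n (k + 1) ≤ s.getD k 0 ↔ suffMax s n 0 ≤ s.getD k 0) := by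
  unfold suffMax
  rw [foldl_max_le_iff, foldl_max_le_iff]
  constructor
  · rintro ⟨h1, h2⟩
    refine ⟨h1, fun j hj => ?_⟩
    have hjmem : j < n.toNat := by
      have := List.mem_range'_1.mp hj
      omega
    by_cases hjk : k + 1 ≤ j
    · exact h2 j (List.mem_range'_1.mpr (by omega))
    · have hjL : j < s.length := by omega
      have hle : s.getD j 0 ≤ s.getD k 0 := hmono j k (by omega) hk
      have : (0 : Int) ≤ (j : Int) := by positivity
      omega
  · rintro ⟨h1, h2⟩
    refine ⟨h1, fun j hj => ?_⟩
    have := List.mem_range'_1.mp hj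
    exact h2 j (List.mem_range'_1.mpr (by omega))

-- Loop invariant of B's single backward pass, processing indices k-1, …, 0 from state
-- (ans, suffMax k): it adds the count of qualifying elements among the first k and ends with
-- the full threshold suffMax 0 as its r-component.
theorem alt_loop_inv (s : List Int) (n : Int)
    (hmono : ∀ p q : Nat, p ≤ q → q < s.length → s.getD p 0 ≤ s.getD q 0) :
    ∀ k, k ≤ s.length → ∀ ans : Int,
      ((List.range k).reverse.map (fun j : Nat => (j : Int))).foldl
        (fun (st : Int × Int) i =>
          (if PySem.List.pyGetD s i 0 ≥ st.2 then st.1 + 1 else st.1,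
           if i < n then max st.2 (PySem.List.pyGetD s i 0 - i) else st.2))
        (ans, suffMax s n k)
      = (ans + ((s.take k).countP (fun x => decide (suffMax s n 0 ≤ x)) : Int), suffMax s n 0) := by
  intro k
  induction k with
  | zero => intro _ ans; simp [suffMax]
  | succ k ih =>
    intro hk1 ans
    have hk : k < s.length := by omega
    rw [List.range_succ, List.reverse_append]
    simp only [List.reverse_cons, List.reverse_nil, List.nil_append, List.map_append,
      List.map_cons, List.map_nil, List.foldl_append, List.foldl_cons, List.foldl_nil]
    have hget : PySem.List.pyGetD s ((k : Nat) : Int) 0 = s.getD k 0 := by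
      simp [PySem.List.pyGetD_natCast]
    have hr : (if (k : Int) < n then max (suffMax s n (k+1)) (PySem.List.pyGetD s (k:Int) 0 - (k:Int))
        else suffMax s n (k+1)) = suffMax s n k := by
      rw [hget]
      by_cases h : (k : Int) < n
      · rw [if_pos h, ← suffMax_succ s n k h]
      · rw [if_neg h, suffMax_stable s n k h]
    have hcond : (PySem.List.pyGetD s (k:Int) 0 ≥ suffMax s n (k+1)) ↔ suffMax s n 0 ≤ s.getD k 0 := by
      rw [hget]; exact ge_suffMax_iff s n k hmono hk
    rw [hr]
    by_cases hc : suffMax s n 0 ≤ s.getD k 0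
    · rw [if_pos (hcond.mpr hc), ih (by omega) (ans + 1)]
      have : s.take (k+1) = s.take k ++ [s[k]] := by
        rw [List.take_add_one]
        simp [List.getElem?_eq_getElem hk]
      rw [this, List.countP_append]
      have hgd : s.getD k 0 = s[k] := List.getD_eq_getElem s 0 hk
      simp only [List.countP_cons, List.countP_nil]
      rw [hgd] at hc
      simp [hc]
      ring
    · rw [if_neg (fun h => hc (hcond.mp h)), ih (by omega) ans]
      have : s.take (k+1) = s.take k ++ [s[k]] := by
        rw [List.take_add_one]
        simp [List.getElem?_eq_getElem hk]
      rw [this, List.countP_append]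
      have hgd : s.getD k 0 = s[k] := List.getD_eq_getElem s 0 hk
      rw [hgd] at hc
      simp [hc]

-- A's threshold loop computes n + suffMax 0.
theorem a_threshold (s : List Int) (n : Int) :
    (PySem.List.pyRange (n - 1) (-1) (-1)).foldl
      (fun a i =>
        let cand := PySem.List.pyGetD s i 0 + n - i
        if cand > a then cand else a) 0
    = n + suffMax s n 0 := by
  have hstep : (fun (a i : Int) =>
      let cand := PySem.List.pyGetD s i 0 + n - i
      if cand > a then cand else a) = fun a i => max a (n + (PySem.List.pyGetD s i 0 - i)) := by
    funext a i
    simp only [gt_iff_lt]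
    split_ifs with h <;> omega
  have hrange : PySem.List.pyRange (n - 1) (-1) (-1) = (PySem.List.pyRange 0 n 1).reverse := by
    rw [PySem.List.pyRange_neg_one_eq_reverse]; norm_num
  rw [hstep, hrange, foldl_max_reverse]
  have hs := foldl_max_shift n (fun i => PySem.List.pyGetD s i 0 - i) (PySem.List.pyRange 0 n 1) (-n)
  rw [show n + -n = (0 : Int) from by ring] at hs
  rw [hs]
  congr 1
  by_cases hn : 0 ≤ n
  · have hn' : n = (n.toNat : Int) := by omega
    rw [hn', PySem.List.pyRange_zero_natCast, List.foldl_map, List.range_eq_range']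
    unfold suffMax
    simp only [Int.toNat_natCast, Nat.sub_zero]
    apply PySem.List.foldl_congr_mem
    intro acc j hj
    simp [PySem.List.pyGetD_natCast]
  · have he : PySem.List.pyRange 0 n 1 = [] := PySem.List.pyRange_one_eq_nil (by omega)
    rw [he]
    unfold suffMax
    rw [show n.toNat - 0 = 0 from by omega]
    rfl

-- The two ports agree on every input with n <= len(nums).
theorem solve_eq_solve_alt (n : Int) (nums : List Int) (hpre : n ≤ (nums.length : Int)) :
    solve n nums = solve_alt n nums := by
  show (PySem.List.sorted nums (fun x => x) false).foldl
      (fun ans x => if x + n ≥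
        ((PySem.List.pyRange (n - 1) (-1) (-1)).foldl
          (fun a i =>
            let cand := PySem.List.pyGetD (PySem.List.sorted nums (fun x => x) false) i 0 + n - i
            if cand > a then cand else a) 0) then ans + 1 else ans) 0
    = ((PySem.List.pyRange (((PySem.List.sorted nums (fun x => x) false).length : Int) - 1) (-1) (-1)).foldl
        (fun (st : Int × Int) i =>
          (if PySem.List.pyGetD (PySem.List.sorted nums (fun x => x) false) i 0 ≥ st.2 then st.1 + 1 else st.1,
           if i < n then max st.2 (PySem.List.pyGetD (PySem.List.sorted nums (fun x => x) false) i 0 - i) else st.2))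
        (0, -n)).1
  set s := PySem.List.sorted nums (fun x => x) false with hsdef
  have hlen : s.length = nums.length := PySem.List.length_sorted nums (fun x => x) false
  have hnL : n ≤ (s.length : Int) := by rw [hlen]; exact hpre
  have hmono : ∀ p q : Nat, p ≤ q → q < s.length → s.getD p 0 ≤ s.getD q 0 := by
    intro p q hpq hq
    have hp : p < s.length := by omega
    rw [List.getD_eq_getElem s 0 hp, List.getD_eq_getElem s 0 hq]
    exact PySem.List.sorted_id_getElem_mono nums hpq hq
  have hrev : PySem.List.pyRange ((s.length : Int) - 1) (-1) (-1)
      = ((List.range s.length).reverse.map (fun j : Nat => (j : Int))) := by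
    rw [PySem.List.pyRange_neg_one_eq_reverse]
    rw [show (-1 : Int) + 1 = 0 from by norm_num,
        show (s.length : Int) - 1 + 1 = (s.length : Int) from by ring]
    rw [PySem.List.pyRange_zero_natCast, ← List.map_reverse]
  have hinit : suffMax s n s.length = -n := by
    unfold suffMax
    rw [Nat.sub_eq_zero_of_le (by omega)]
    rfl
  have hB := alt_loop_inv s n hmono s.length (le_refl _) 0
  rw [a_threshold s n, hrev, ← hinit, hB]
  rw [PySem.List.foldl_ite_add_one (l := s) (p := fun x => x + n ≥ n + suffMax s n 0) (a := (0 : Int))]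
  rw [List.take_length]
  have hcp : (s.countP fun x => decide (x + n ≥ n + suffMax s n 0))
      = s.countP (fun x => decide (suffMax s n 0 ≤ x)) := by
    apply List.countP_congr
    intro x _
    simp only [ge_iff_le, decide_eq_true_eq]
    omega
  rw [hcp]

-- ===== VERDICT (by name: the statement is the Claim_ definition above) =====
theorem solve_spec : Claim_equal_solve := by
  intro n nums _ hpre
  unfold Spec_solve
  exact solve_eq_solve_alt n nums hpre
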